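-- pv_equiv track=rewrite | github.com/npmurphy/biofilm_pulse | lib/filename_parser.py | tenx_ignore_files
-- ===== SOURCE A (Python) =====
-- def tenx_ignore_files(sfl):
--     bad_strings = [ "bead"
--                   #, "20x"
--                   , '2xqp_24hrs_2_5_2_'
--                   , "test_ofrbleach"
--                   , "double"
--                   , "1_6-2_230615"
--                   , "_1_5_2_240615"
--                   , "_2_5_2_"
--                   , "_3_5_2_"
--                   ]
--     filt = sfl.copy()
--     for st in bad_strings:
--         filt = [f for f in filt if st not in f.lower()]
--     return filt
-- ===== SOURCE B (Python) =====
-- def tenx_ignore_files(sfl):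
--     bad_strings = ("bead 2xqp_24hrs_2_5_2_ test_ofrbleach double"
--                    " 1_6-2_230615 _1_5_2_240615 _2_5_2_ _3_5_2_").split()
--     def is_bad(name):
--         for st in bad_strings:
--             if st in name:
--                 return True
--         return False
--     return [f for f in sfl if not is_bad(f.lower())]
-- ===== Notes on version B (the rewrite author's own statement) =====
-- stated objective: simpler
-- what changed: Replaces A's k sequential filtering passes (a full rebuilt list per bad substring) with one pass over the filenames that lowercases each name once and drops it via an early-exit is_bad helper scanning the bad substrings.
import Mathlib
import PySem

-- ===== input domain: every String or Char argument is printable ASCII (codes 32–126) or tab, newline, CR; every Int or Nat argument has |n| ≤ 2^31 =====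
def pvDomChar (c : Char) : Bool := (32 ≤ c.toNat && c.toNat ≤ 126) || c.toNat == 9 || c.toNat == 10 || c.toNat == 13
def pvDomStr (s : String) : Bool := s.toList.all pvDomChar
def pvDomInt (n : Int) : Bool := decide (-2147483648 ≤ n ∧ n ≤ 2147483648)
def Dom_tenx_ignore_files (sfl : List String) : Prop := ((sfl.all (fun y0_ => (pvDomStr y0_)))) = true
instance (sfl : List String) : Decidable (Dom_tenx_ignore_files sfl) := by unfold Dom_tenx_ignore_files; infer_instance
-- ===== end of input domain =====

-- B replaces A's k sequential filtering passes with one structural pass over the filenames using an early-exit bad-substring helper (simpler; same output and order).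
-- ===== PORT A =====
def tenxBadStringsA : List String :=
  [ "bead"
  , "2xqp_24hrs_2_5_2_"
  , "test_ofrbleach"
  , "double"
  , "1_6-2_230615"
  , "_1_5_2_240615"
  , "_2_5_2_"
  , "_3_5_2_"
  ]

def tenx_ignore_files (sfl : List String) : List String :=
  tenxBadStringsA.foldl
    (fun filt st => filt.filter (fun f => !(PySem.Str.isIn st (PySem.Str.lower f))))
    sfl

-- ===== PORT B =====
def tenxBadStringsB : List String :=
  PySem.Str.split₀ "bead 2xqp_24hrs_2_5_2_ test_ofrbleach double 1_6-2_230615 _1_5_2_240615 _2_5_2_ _3_5_2_"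

-- early-exit scan of the bad substrings (B's inner `for … return True` loop)
def tenxIsBad : List String → String → Bool
  | [], _ => false
  | st :: rest, name => if PySem.Str.isIn st name then true else tenxIsBad rest name

def tenx_ignore_files_alt : List String → List String
  | [] => []
  | f :: rest =>
      if tenxIsBad tenxBadStringsB (PySem.Str.lower f) then tenx_ignore_files_alt rest
      else f :: tenx_ignore_files_alt rest

-- ===== PRECONDITION & SPEC =====
def Spec_tenx_ignore_files (sfl : List String) (out : List String) : Prop := out = tenx_ignore_files_alt sfl
instance (sfl : List String) (out : List String) : Decidable (Spec_tenx_ignore_files sfl out) := by unfold Spec_tenx_ignore_files; infer_instance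

-- ===== CLAIM (what is proved, stated in full; the proofs are below) =====
def Claim_equal_tenx_ignore_files : Prop := ∀ (sfl : List String), Dom_tenx_ignore_files sfl → Spec_tenx_ignore_files sfl (tenx_ignore_files sfl)

-- ===== LEMMAS AND PROOFS =====

-- A's k sequential filters collapse into one filter by the conjunction of the tests
theorem foldl_filter_eq_filter_all (ps : List String) (xs : List String) :
    ps.foldl (fun filt st => filt.filter (fun f => !(PySem.Str.isIn st (PySem.Str.lower f)))) xs
      = xs.filter (fun f => ps.all (fun st => !(PySem.Str.isIn st (PySem.Str.lower f)))) := by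
  induction ps generalizing xs with
  | nil => simp
  | cons st ps ih =>
    simp only [List.foldl_cons, ih, List.filter_filter, List.all_cons]
    exact List.filter_congr (fun f _ => by simp [Bool.and_comm])

-- the early-exit scan is the disjunction of the membership tests
theorem tenxIsBad_eq_any (ps : List String) (name : String) :
    tenxIsBad ps name = ps.any (fun st => PySem.Str.isIn st name) := by
  induction ps with
  | nil => rfl
  | cons st ps ih =>
    rw [tenxIsBad.eq_def]
    simp [ih]

-- B's structural recursion is a filter
theorem alt_eq_filter (sfl : List String) :
    tenx_ignore_files_alt sfl
      = sfl.filter (fun f => !(tenxIsBad tenxBadStringsB (PySem.Str.lower f))) := by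
  induction sfl with
  | nil => rfl
  | cons f rest ih =>
    by_cases h : tenxIsBad tenxBadStringsB (PySem.Str.lower f) <;>
      simp [tenx_ignore_files_alt, h, ih]

-- ===== VERDICT (by name: the statement is the Claim_ definition above) =====
theorem tenx_ignore_files_spec : Claim_equal_tenx_ignore_files := by
  intro sfl _
  show tenx_ignore_files sfl = tenx_ignore_files_alt sfl
  rw [tenx_ignore_files, foldl_filter_eq_filter_all, alt_eq_filter]
  refine List.filter_congr (fun f _ => ?_)
  rw [tenxIsBad_eq_any]
  show tenxBadStringsA.all _ = _
  rw [show tenxBadStringsA = tenxBadStringsB from by decide]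
  simp [List.all_eq_not_any_not]
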